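-- pv_equiv track=rewrite | github.com/JungHyeono/programmers | 프로그래머스/0/120876. 겹치는 선분의 길이/겹치는 선분의 길이.py | solution
-- ===== SOURCE A (Python) =====
-- def solution(lines):
--     map = [0] * 201
--     for s,e in lines:
--         for i in range(s+100,e+100):
--             map[i] += 1
--     result = 0
--
--     for j in map:
--         if j >= 2:
--             result += 1
--     return result
-- ===== SOURCE B (Python) =====
-- def solution(lines):
--     result = 0
--     for x in range(-100, 101):
--         covered = 0
--         for (s, e) in lines:
--             if s <= x < e:
--                 covered += 1
--         if covered >= 2:
--             result += 1
--     return result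
-- ===== Notes on version B (the rewrite author's own statement) =====
-- stated objective: alternative
-- what changed: Replaces A's mutable 201-slot histogram (increment a bucket for every unit of every segment, then threshold-scan the array) by an inverted traversal: for each unit cell x in [-100,101) count directly how many segments cover it, with no auxiliary array.
-- outside the precondition, e.g. on solution([(-101, -99), (-101, -99)]): A returns 2, B returns 1; on solution([(-150, -120)]): A returns 0, B returns 0; on solution([(0, 150)]): A raises IndexError, B returns 0
import Mathlib
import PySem

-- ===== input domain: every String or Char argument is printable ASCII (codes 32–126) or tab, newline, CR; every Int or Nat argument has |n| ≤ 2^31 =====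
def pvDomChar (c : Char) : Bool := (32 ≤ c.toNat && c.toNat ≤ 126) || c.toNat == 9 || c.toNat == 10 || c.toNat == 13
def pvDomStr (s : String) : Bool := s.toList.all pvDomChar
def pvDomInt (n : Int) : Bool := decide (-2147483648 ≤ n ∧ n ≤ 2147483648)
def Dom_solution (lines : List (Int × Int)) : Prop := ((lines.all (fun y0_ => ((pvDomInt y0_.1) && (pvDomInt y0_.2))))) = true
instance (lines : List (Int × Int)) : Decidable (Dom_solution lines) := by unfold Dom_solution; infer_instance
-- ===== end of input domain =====

-- B inverts A's traversal: instead of incrementing a 201-slot bucket array per unit of each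
-- segment and then threshold-scanning it, B counts for each unit cell in [-100,101) how many
-- segments cover it (no auxiliary array). Objective: alternative decomposition, not faster.


-- ===== PORT A =====
-- map[i] += 1 : read with pyGetD, write with pySetD (total forms, exact wherever Python does
-- not raise, i.e. on every input Pre_ admits).
def pyInc (m : List Int) (i : Int) : List Int :=
  PySem.List.pySetD m i (PySem.List.pyGetD m i 0 + 1)

def solution (lines : List (Int × Int)) : Int :=
  let m0 : List Int := List.replicate 201 0
  let m := lines.foldl
    (fun m p => (PySem.List.pyRange (p.1 + 100) (p.2 + 100) 1).foldl pyInc m) m0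
  m.foldl (fun result j => if j ≥ 2 then result + 1 else result) 0

-- ===== PORT B =====
def coveredCount (lines : List (Int × Int)) (x : Int) : Int :=
  lines.foldl (fun c p => if p.1 ≤ x ∧ x < p.2 then c + 1 else c) 0

def solution_alt (lines : List (Int × Int)) : Int :=
  (PySem.List.pyRange (-100) 101 1).foldl
    (fun result x => if coveredCount lines x ≥ 2 then result + 1 else result) 0

-- ===== PRECONDITION & SPEC =====
-- Pre_ excludes inputs holding a proper segment (s < e) with e ≥ 102 or s ≤ -302, on which A
-- raises IndexError, and inputs holding a proper segment with s in [-301,-101], on which A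
-- returns a value only by wrapping its negative bucket indices into the top of its 201-slot
-- array — an accident of the array representation no caller would specify, which B's
-- array-free cell sweep does not reproduce.  Degenerate pairs (s ≥ e) are unconstrained:
-- A's inner range is empty there.
def Pre_solution (lines : List (Int × Int)) : Prop :=
  ∀ p ∈ lines, p.1 < p.2 → -100 ≤ p.1 ∧ p.2 ≤ 101
instance (lines : List (Int × Int)) : Decidable (Pre_solution lines) := by
  unfold Pre_solution; infer_instance
def pvWitness_solution : (List (Int × Int)) := [(0, 2), (1, 3)]

def Spec_solution (lines : List (Int × Int)) (out : Int) : Prop := out = solution_alt lines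
instance (lines : List (Int × Int)) (out : Int) : Decidable (Spec_solution lines out) := by
  unfold Spec_solution; infer_instance

-- ===== CLAIM (what is proved, stated in full; the proofs are below) =====
def Claim_equal_solution : Prop :=
  ∀ (lines : List (Int × Int)), Dom_solution lines → Pre_solution lines →
    Spec_solution lines (solution lines)

-- ===== LEMMAS AND PROOFS =====

-- the per-cell coverage count both programs compute
def cnt (lines : List (Int × Int)) (x : Int) : Int :=
  (lines.countP (fun p => decide (p.1 ≤ x ∧ x < p.2)) : Int)

theorem coveredCount_eq_cnt (lines : List (Int × Int)) (x : Int) :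
    coveredCount lines x = cnt lines x := by
  rw [coveredCount, cnt, PySem.List.foldl_ite_add_one (fun p => p.1 ≤ x ∧ x < p.2) lines 0]
  simp

-- inner bucket loop of one segment: pointwise +1 on positions in [a,b)
theorem fold_pyInc_spec (b : Int) (hb : b ≤ 201) :
    ∀ (n : Nat) (a : Int), 0 ≤ a → (b - a).toNat = n →
    ∀ (m : List Int), m.length = 201 →
      ((PySem.List.pyRange a b 1).foldl pyInc m).length = 201 ∧
      ∀ j : Nat, ((PySem.List.pyRange a b 1).foldl pyInc m).getD j 0 =
          m.getD j 0 + (if a ≤ (j : Int) ∧ (j : Int) < b then 1 else 0) := by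
  intro n
  induction n with
  | zero =>
    intro a ha hn m hm
    rw [PySem.List.pyRange_one_eq_nil (by omega)]
    refine ⟨hm, fun j => ?_⟩
    have : ¬ (a ≤ (j : Int) ∧ (j : Int) < b) := by omega
    simp [this]
  | succ n ih =>
    intro a ha hn m hm
    have hab : a < b := by omega
    rw [PySem.List.pyRange_one_cons hab]
    have hlt : a < (201 : Int) := by omega
    have hinc : pyInc m a = m.set a.toNat (m[a.toNat]'(by omega) + 1) := by
      rw [pyInc, PySem.List.pySetD_of_nonneg m _ ha,
        PySem.List.pyGetD_eq_getElem m 0 ha (by omega)]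
    have hlen : (pyInc m a).length = 201 := by rw [hinc]; simp [hm]
    have := ih (a + 1) (by omega) (by omega) (pyInc m a) hlen
    simp only [List.foldl_cons]
    refine ⟨this.1, fun j => ?_⟩
    rw [this.2 j, hinc]
    by_cases hj : j = a.toNat
    · subst hj
      have h1 : (m.set a.toNat (m[a.toNat]'(by omega) + 1)).getD a.toNat 0
          = m[a.toNat]'(by omega) + 1 := by
        have hl : a.toNat < m.length := by omega
        simp [List.getD, hl]
      have h2 : m.getD a.toNat 0 = m[a.toNat]'(by omega) := by
        have hl : a.toNat < m.length := by omega
        simp [List.getD, List.getElem?_eq_getElem hl]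
      rw [h1, h2]
      have hc1 : ¬ (a + 1 ≤ (a.toNat : Int) ∧ (a.toNat : Int) < b) := by omega
      have hc2 : (a ≤ (a.toNat : Int) ∧ (a.toNat : Int) < b) := by omega
      rw [if_neg hc1, if_pos hc2]; ring
    · have h1 : (m.set a.toNat (m[a.toNat]'(by omega) + 1)).getD j 0 = m.getD j 0 := by
        simp [List.getD, List.getElem?_set_ne (by omega : a.toNat ≠ j)]
      rw [h1]
      have hja : (j : Int) ≠ a := by omega
      by_cases hc : a + 1 ≤ (j : Int) ∧ (j : Int) < b
      · rw [if_pos hc, if_pos (by omega : a ≤ (j : Int) ∧ (j : Int) < b)]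
      · rw [if_neg hc, if_neg (by omega : ¬ (a ≤ (j : Int) ∧ (j : Int) < b))]

-- the whole bucket-building loop: bucket j holds the coverage count of cell j - 100
theorem build_spec (lines : List (Int × Int)) (h : Pre_solution lines) :
    ∀ (m : List Int), m.length = 201 →
      (lines.foldl (fun m p => (PySem.List.pyRange (p.1 + 100) (p.2 + 100) 1).foldl pyInc m) m).length = 201 ∧
      ∀ j : Nat, j < 201 →
        (lines.foldl (fun m p => (PySem.List.pyRange (p.1 + 100) (p.2 + 100) 1).foldl pyInc m) m).getD j 0 =
          m.getD j 0 + cnt lines ((j : Int) - 100) := by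
  induction lines with
  | nil => intro m hm; refine ⟨hm, fun j _ => ?_⟩; simp [cnt]
  | cons p rest ih =>
    intro m hm
    have hrest : Pre_solution rest := fun q hq => h q (List.mem_cons_of_mem p hq)
    simp only [List.foldl_cons]
    by_cases hpe : p.2 ≤ p.1
    · rw [PySem.List.pyRange_one_eq_nil (by omega)]
      simp only [List.foldl_nil]
      refine ⟨(ih hrest m hm).1, fun j hj => ?_⟩
      rw [(ih hrest m hm).2 j hj]
      have : cnt (p :: rest) ((j : Int) - 100) = cnt rest ((j : Int) - 100) := by
        simp [cnt, List.countP_cons]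
        omega
      omega
    · obtain ⟨hs, he⟩ := h p (List.mem_cons_self) (by omega)
      have hin := fold_pyInc_spec (p.2 + 100) (by omega) (p.2 - p.1).toNat (p.1 + 100)
        (by omega) (by omega) m hm
      refine ⟨(ih hrest _ hin.1).1, fun j hj => ?_⟩
      rw [(ih hrest _ hin.1).2 j hj, hin.2 j]
      have : cnt (p :: rest) ((j : Int) - 100) = cnt rest ((j : Int) - 100)
          + (if p.1 + 100 ≤ (j : Int) ∧ (j : Int) < p.2 + 100 then 1 else 0) := by
        by_cases hc : p.1 ≤ (j : Int) - 100 ∧ (j : Int) - 100 < p.2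
        · simp [cnt, hc, if_pos (by omega : p.1 + 100 ≤ (j : Int) ∧ (j : Int) < p.2 + 100)]
        · simp [cnt, hc, if_neg (by omega : ¬ (p.1 + 100 ≤ (j : Int) ∧ (j : Int) < p.2 + 100))]
      omega

-- A's final bucket array IS the cell-indexed coverage map B sweeps over
theorem solution_eq (lines : List (Int × Int)) (hpre : Pre_solution lines) :
    solution lines = solution_alt lines := by
  rw [solution, solution_alt]
  have hb := build_spec lines hpre (List.replicate 201 0) (by rw [List.length_replicate])
  set M := lines.foldl (fun m p => (PySem.List.pyRange (p.1+100) (p.2+100) 1).foldl pyInc m)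
    (List.replicate 201 0) with hM
  have hmap : M = (PySem.List.pyRange (-100) 101 1).map (fun x => cnt lines x) := by
    apply List.ext_getElem
    · rw [hb.1]; rw [List.length_map, PySem.List.length_pyRange_one]; decide
    · intro j h1 h2
      have hj : j < 201 := by rw [hb.1] at h1; exact h1
      have hgd : M.getD j 0 = (List.replicate 201 0).getD j 0 + cnt lines ((j:Int) - 100) :=
        hb.2 j hj
      rw [List.getD_replicate _ hj] at hgd
      have hget : M.getD j 0 = M[j] := by
        rw [List.getD_eq_getElem?_getD, List.getElem?_eq_getElem h1, Option.getD_some]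
      rw [List.getElem_map, PySem.List.getElem_pyRange_one]
      rw [← hget, hgd]
      have : (-100 : Int) + (j : Int) = (j : Int) - 100 := by ring
      rw [this]
      ring
  rw [hmap, PySem.List.foldl_ite_add_one (fun j => j ≥ 2) _ 0, List.countP_map,
    PySem.List.foldl_ite_add_one (fun x => coveredCount lines x ≥ 2) _ 0]
  simp only [coveredCount_eq_cnt]
  rfl

-- ===== VERDICT (by name: the statement is the Claim_ definition above) =====
theorem solution_spec : Claim_equal_solution := by
  intro lines _ hpre
  unfold Spec_solution
  exact solution_eq lines hpre
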